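-- pv_equiv track=rewrite | github.com/chomh168/beakjoon | programmers/스택큐/p_스택큐_1/solve.py | checkCount
-- ===== SOURCE A (Python) =====
-- def checkCount(progresses, speeds):
--     prevDay = 0
--     count = 0
--     result = []
--     for index, each in enumerate(progresses):
--         if (each + (speeds[index] * prevDay)) >= 100:
--             count += 1
--         else:
--             if count >= 1:
--                 result.append(count)
--                 count = 0
--
--             if (100 - each) % speeds[index] == 0:
--                 day = ((100 - each - speeds[index] * prevDay) // speeds[index])
--             else:
--                 day = ((100 - each - speeds[index] * prevDay) // speeds[index]) + 1
--
--             prevDay += day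
--             count += 1
--
--     result.append(count)
--
--     return result
-- ===== SOURCE B (Python) =====
-- def checkCount(progresses, speeds):
--     # Two-pointer grouping: each outer step opens a group at a leader, the
--     # inner scan extends it over consecutive tasks done by the leader's day.
--     n = len(progresses)
--     result = []
--     prevDay = 0
--     i = 0
--     while i < n:
--         p, s = progresses[i], speeds[i]
--         if p + s * prevDay < 100:
--             q, r = divmod(100 - p, s)
--             prevDay = q if r == 0 else q + 1
--         j = i + 1
--         while j < n and progresses[j] + speeds[j] * prevDay >= 100:
--             j += 1
--         result.append(j - i)
--         i = j
--     return result
-- ===== Notes on version B (the rewrite author's own statement) =====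
-- stated objective: alternative
-- what changed: A's single flat loop carrying a running count and flush-on-failure accumulator is replaced by a two-pointer grouping pass: each outer step opens a group at a leader task, computes the leader's absolute finish day directly with divmod, and an inner scan extends the group over consecutive tasks already done by that day.
-- intended difference: On empty progresses A returns [0] (a spurious group of zero tasks from its final unconditional append) while B returns [], the intended answer for no tasks. — e.g. on checkCount([], []): A returns [0], B returns []
import Mathlib
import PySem

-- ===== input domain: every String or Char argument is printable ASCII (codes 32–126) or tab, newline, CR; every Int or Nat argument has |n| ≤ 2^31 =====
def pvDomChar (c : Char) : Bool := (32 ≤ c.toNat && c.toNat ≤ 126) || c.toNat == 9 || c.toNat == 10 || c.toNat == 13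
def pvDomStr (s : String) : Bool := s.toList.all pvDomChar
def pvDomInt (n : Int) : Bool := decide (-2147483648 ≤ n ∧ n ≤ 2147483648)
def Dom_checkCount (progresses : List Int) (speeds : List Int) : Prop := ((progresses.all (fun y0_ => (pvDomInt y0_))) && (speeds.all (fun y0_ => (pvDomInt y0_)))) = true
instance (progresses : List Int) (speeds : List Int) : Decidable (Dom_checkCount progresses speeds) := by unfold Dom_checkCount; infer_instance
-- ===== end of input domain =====

-- B replaces A's flat accumulator loop by a two-pointer grouping pass (alternative
-- decomposition, same cost); on empty `progresses` A returns [0], B returns [] (see D_).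

-- ===== PORT A =====
-- one step of A's for-loop: state (prevDay, count, result), element (index, each)
def aStep (speeds : List Int) (st : Int × Int × List Int) (ie : Int × Int) : Int × Int × List Int :=
  let prevDay := st.1
  let count := st.2.1
  let result := st.2.2
  let s := PySem.List.pyGetD speeds ie.1 0   -- speeds[index]; in range under Pre_
  if ie.2 + s * prevDay ≥ 100 then
    (prevDay, count + 1, result)
  else
    let cr := if count ≥ 1 then ((0 : Int), result ++ [count]) else (count, result)
    let day := if PySem.Int.mod (100 - ie.2) s = 0
      then PySem.Int.floordiv (100 - ie.2 - s * prevDay) s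
      else PySem.Int.floordiv (100 - ie.2 - s * prevDay) s + 1
    (prevDay + day, cr.1 + 1, cr.2)

def checkCount (progresses : List Int) (speeds : List Int) : List Int :=
  let st := (PySem.List.enumerate progresses).foldl (aStep speeds) (0, 0, [])
  st.2.2 ++ [st.2.1]

-- ===== PORT B =====
-- inner while of Source B: how many consecutive tasks are already done by day `prevDay`
def altRun (prevDay : Int) : List (Int × Int) → Nat
  | [] => 0
  | (p, s) :: rest => if p + s * prevDay ≥ 100 then altRun prevDay rest + 1 else 0

-- outer while of Source B: open a group at the leader, extend it, continue past it
-- (the Nat argument is fuel making the recursion structural; length is always enough)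
def altLoopF : Nat → List (Int × Int) → Int → List Int
  | 0, _, _ => []
  | _ + 1, [], _ => []
  | f + 1, (p, s) :: rest, prevDay =>
    let pd := if p + s * prevDay < 100 then
        (let q := PySem.Int.floordiv (100 - p) s
         if PySem.Int.mod (100 - p) s = 0 then q else q + 1)
      else prevDay
    let k := altRun pd rest
    ((1 : Int) + (k : Int)) :: altLoopF f (rest.drop k) pd

def checkCount_alt (progresses : List Int) (speeds : List Int) : List Int :=
  altLoopF (progresses.zip speeds).length (progresses.zip speeds) 0

-- ===== PRECONDITION & SPEC =====
-- Pre_ is exactly where Python A returns: speeds long enough (else IndexError) and no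
-- used speed that is 0 while its task is unfinished (else ZeroDivisionError).
def Pre_checkCount (progresses : List Int) (speeds : List Int) : Prop :=
  progresses.length ≤ speeds.length ∧
  ∀ pr ∈ progresses.zip speeds, pr.2 ≠ 0 ∨ 100 ≤ pr.1
instance (progresses : List Int) (speeds : List Int) : Decidable (Pre_checkCount progresses speeds) := by
  unfold Pre_checkCount; infer_instance

def pvWitness_checkCount : List Int × List Int := ([93, 30, 55], [1, 30, 5])

-- On empty `progresses` A returns [0] (a group of zero tasks, an artefact of its final
-- unconditional append) while B returns [], the intended "no tasks, no deployments".
def D_checkCount (progresses : List Int) (speeds : List Int) : Prop := progresses = []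
instance (progresses : List Int) (speeds : List Int) : Decidable (D_checkCount progresses speeds) := by
  unfold D_checkCount; infer_instance

def Spec_checkCount (progresses : List Int) (speeds : List Int) (out : List Int) : Prop :=
  ¬ D_checkCount progresses speeds → out = checkCount_alt progresses speeds
instance (progresses : List Int) (speeds : List Int) (out : List Int) : Decidable (Spec_checkCount progresses speeds out) := by
  unfold Spec_checkCount; infer_instance

def pvDiffWitness_checkCount : List Int × List Int := ([], [])
def pvDiffWitnessOut_checkCount : (List Int) × (List Int) := ([0], [])

-- ===== CLAIM (what is proved, stated in full; the proofs are below) =====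
def Claim_unchanged_checkCount : Prop := ∀ (progresses : List Int) (speeds : List Int), Dom_checkCount progresses speeds → Pre_checkCount progresses speeds → Spec_checkCount progresses speeds (checkCount progresses speeds)
def Claim_changed_checkCount : Prop := Dom_checkCount (pvDiffWitness_checkCount.1) (pvDiffWitness_checkCount.2) ∧ Pre_checkCount (pvDiffWitness_checkCount.1) (pvDiffWitness_checkCount.2) ∧ D_checkCount (pvDiffWitness_checkCount.1) (pvDiffWitness_checkCount.2) ∧ checkCount (pvDiffWitness_checkCount.1) (pvDiffWitness_checkCount.2) = pvDiffWitnessOut_checkCount.1 ∧ checkCount_alt (pvDiffWitness_checkCount.1) (pvDiffWitness_checkCount.2) = pvDiffWitnessOut_checkCount.2 ∧ pvDiffWitnessOut_checkCount.1 ≠ pvDiffWitnessOut_checkCount.2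
def Claim_exact_checkCount : Prop := ∀ (progresses : List Int) (speeds : List Int), Dom_checkCount progresses speeds → Pre_checkCount progresses speeds → D_checkCount progresses speeds → checkCount progresses speeds ≠ checkCount_alt progresses speeds

-- ===== LEMMAS AND PROOFS =====

-- A's loop, rewritten as a direct recursion over the zipped input (proof device)
def aloop : List (Int × Int) → Int → Int → List Int
  | [], _, c => [c]
  | (p, s) :: rest, pd, c =>
    if p + s * pd ≥ 100 then aloop rest pd (c + 1)
    else
      let day := if PySem.Int.mod (100 - p) s = 0
        then PySem.Int.floordiv (100 - p - s * pd) s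
        else PySem.Int.floordiv (100 - p - s * pd) s + 1
      (if c ≥ 1 then [c] else []) ++ aloop rest (pd + day) ((if c ≥ 1 then 0 else c) + 1)

theorem fd_shift (a s pd : Int) (h : s ≠ 0) :
    PySem.Int.floordiv (a - s * pd) s = PySem.Int.floordiv a s - pd := by
  have := Int.add_mul_fdiv_right a (-pd) h
  simp only [PySem.Int.floordiv]
  have e : a - s * pd = a + (-pd) * s := by ring
  rw [e, this]; ring

theorem pyGetD_of_drop (speeds : List Int) (n : Nat) (s : Int) (tl : List Int)
    (h : speeds.drop n = s :: tl) : PySem.List.pyGetD speeds (n : Int) 0 = s := by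
  have h0 : speeds[n]? = some s := by
    have := List.getElem?_drop (xs := speeds) (i := n) (j := 0)
    simpa [h] using this.symm
  rw [PySem.List.pyGetD_natCast]
  simp [List.getD, h0]

theorem foldA (speeds : List Int) : ∀ (ps tl : List Int) (n : Nat) (pd c : Int) (acc : List Int),
    speeds.drop n = tl → ps.length ≤ tl.length →
    (((PySem.List.enumerate ps (n : Int)).foldl (aStep speeds) (pd, c, acc)).2.2
      ++ [((PySem.List.enumerate ps (n : Int)).foldl (aStep speeds) (pd, c, acc)).2.1])
      = acc ++ aloop (ps.zip tl) pd c := by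
  intro ps
  induction ps with
  | nil => intro tl n pd c acc _ _; simp [PySem.List.enumerate, aloop]
  | cons p ps' ih =>
    intro tl n pd c acc hdrop hlen
    cases tl with
    | nil => simp at hlen
    | cons s tl' =>
      have hs : PySem.List.pyGetD speeds (n : Int) 0 = s := pyGetD_of_drop speeds n s tl' hdrop
      have hdrop' : speeds.drop (n + 1) = tl' := by
        have := List.drop_drop (i := 1) (j := n) (l := speeds)
        rw [← this, hdrop]; rfl
      have hlen' : ps'.length ≤ tl'.length := by simpa using hlen
      rw [PySem.List.enumerate_cons]
      have hcast : (n : Int) + 1 = ((n + 1 : Nat) : Int) := by push_cast; ring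
      simp only [List.foldl_cons, hcast]
      by_cases hc : p + s * pd ≥ 100
      · rw [show aStep speeds (pd, c, acc) ((n : Int), p) = (pd, c + 1, acc) by
          simp [aStep, hs, hc]]
        rw [ih tl' (n + 1) pd (c + 1) acc hdrop' hlen']
        simp [aloop, hc]
      · by_cases hcnt : c ≥ 1
        · rw [show aStep speeds (pd, c, acc) ((n : Int), p)
              = (pd + (if PySem.Int.mod (100 - p) s = 0
                  then PySem.Int.floordiv (100 - p - s * pd) s
                  else PySem.Int.floordiv (100 - p - s * pd) s + 1), 0 + 1, acc ++ [c]) by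
            simp [aStep, hs, hc, hcnt]]
          rw [ih tl' (n + 1) _ _ _ hdrop' hlen']
          simp [aloop, hc, hcnt]
        · rw [show aStep speeds (pd, c, acc) ((n : Int), p)
              = (pd + (if PySem.Int.mod (100 - p) s = 0
                  then PySem.Int.floordiv (100 - p - s * pd) s
                  else PySem.Int.floordiv (100 - p - s * pd) s + 1), c + 1, acc) by
            simp [aStep, hs, hc, hcnt]]
          rw [ih tl' (n + 1) _ _ _ hdrop' hlen']
          simp [aloop, hc, hcnt]

def goodL (l : List (Int × Int)) : Prop := ∀ pr ∈ l, pr.2 ≠ 0 ∨ 100 ≤ pr.1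

-- A's updated prevDay equals B's absolute finish day for the leader
theorem pd_update (p s pd : Int) (hs : s ≠ 0) :
    pd + (if PySem.Int.mod (100 - p) s = 0
        then PySem.Int.floordiv (100 - p - s * pd) s
        else PySem.Int.floordiv (100 - p - s * pd) s + 1)
      = (if PySem.Int.mod (100 - p) s = 0
        then PySem.Int.floordiv (100 - p) s
        else PySem.Int.floordiv (100 - p) s + 1) := by
  rw [fd_shift (100 - p) s pd hs]
  split_ifs <;> ring

theorem altLoopF_nil (f : Nat) (pd : Int) : altLoopF f [] pd = [] := by
  cases f <;> rfl

theorem fuelIrrel : ∀ (f f' : Nat) (l : List (Int × Int)) (pd : Int),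
    l.length ≤ f → l.length ≤ f' → altLoopF f l pd = altLoopF f' l pd := by
  intro f
  induction f with
  | zero =>
    intro f' l pd h _
    have : l = [] := List.length_eq_zero_iff.mp (by omega)
    subst this
    simp [altLoopF_nil]
  | succ f ih =>
    intro f' l pd hf hf'
    cases l with
    | nil => simp [altLoopF_nil]
    | cons hd rest =>
      obtain ⟨p, s⟩ := hd
      cases f' with
      | zero => simp at hf'
      | succ f'' =>
        simp only [altLoopF]
        congr 1
        apply ih
        · simp at hf ⊢; omega
        · simp at hf' ⊢; omega

theorem s_ne_zero (p s pd : Int) (hg : goodL [(p, s)]) (hcond : ¬ p + s * pd ≥ 100) : s ≠ 0 := by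
  rcases hg (p, s) List.mem_cons_self with h | h
  · exact h
  · intro h0; rw [h0] at hcond; simp at hcond; omega

theorem L1 : ∀ (l : List (Int × Int)) (pd c : Int), goodL l → 1 ≤ c →
    aloop l pd c = (c + (altRun pd l : Int))
      :: altLoopF (l.drop (altRun pd l)).length (l.drop (altRun pd l)) pd := by
  intro l
  induction l with
  | nil => intro pd c _ _; simp [aloop, altRun, altLoopF_nil]
  | cons hd rest ih =>
    intro pd c hg hc
    obtain ⟨p, s⟩ := hd
    have hg' : goodL rest := fun pr h => hg pr (List.mem_cons_of_mem _ h)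
    by_cases hcond : p + s * pd ≥ 100
    · rw [show aloop ((p, s) :: rest) pd c = aloop rest pd (c + 1) by simp [aloop, hcond]]
      rw [ih pd (c + 1) hg' (by omega)]
      have hrun : altRun pd ((p, s) :: rest) = altRun pd rest + 1 := by simp [altRun, hcond]
      rw [hrun]
      simp only [List.drop_succ_cons]
      congr 1
      push_cast; ring
    · have hs : s ≠ 0 :=
        s_ne_zero p s pd (fun pr h => by simp at h; subst h; exact hg _ List.mem_cons_self) hcond
      have hrun : altRun pd ((p, s) :: rest) = 0 := by simp [altRun, hcond]
      rw [hrun]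
      simp only [List.drop_zero, Nat.cast_zero, add_zero]
      rw [show aloop ((p, s) :: rest) pd c
          = [c] ++ aloop rest (pd + (if PySem.Int.mod (100 - p) s = 0
              then PySem.Int.floordiv (100 - p - s * pd) s
              else PySem.Int.floordiv (100 - p - s * pd) s + 1)) 1 by
        simp [aloop, hcond, hc]]
      rw [pd_update p s pd hs]
      rw [ih _ 1 hg' le_rfl]
      have hlt : p + s * pd < 100 := by omega
      simp only [List.length_cons, altLoopF, hlt, if_true]
      simp only [List.cons_append, List.nil_append]
      congr 1
      congr 1
      exact fuelIrrel _ _ _ _ (by simp only [List.length_drop]; omega) (by simp only [List.length_drop]; omega)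

theorem L0 (l : List (Int × Int)) (pd : Int) (hg : goodL l) (hne : l ≠ []) :
    aloop l pd 0 = altLoopF l.length l pd := by
  cases l with
  | nil => exact absurd rfl hne
  | cons hd rest =>
    obtain ⟨p, s⟩ := hd
    have hg' : goodL rest := fun pr h => hg pr (List.mem_cons_of_mem _ h)
    by_cases hcond : p + s * pd ≥ 100
    · rw [show aloop ((p, s) :: rest) pd 0 = aloop rest pd 1 by simp [aloop, hcond]]
      rw [L1 rest pd 1 hg' le_rfl]
      have hlt : ¬ p + s * pd < 100 := by omega
      simp only [List.length_cons, altLoopF, hlt, if_false]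
      congr 1
      exact fuelIrrel _ _ _ _ (by simp only [List.length_drop]; omega) (by simp only [List.length_drop]; omega)
    · have hs : s ≠ 0 :=
        s_ne_zero p s pd (fun pr h => by simp at h; subst h; exact hg _ List.mem_cons_self) hcond
      rw [show aloop ((p, s) :: rest) pd 0
          = aloop rest (pd + (if PySem.Int.mod (100 - p) s = 0
              then PySem.Int.floordiv (100 - p - s * pd) s
              else PySem.Int.floordiv (100 - p - s * pd) s + 1)) 1 by
        simp [aloop, hcond]]
      rw [pd_update p s pd hs]
      rw [L1 rest _ 1 hg' le_rfl]
      have hlt : p + s * pd < 100 := by omega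
      simp only [List.length_cons, altLoopF, hlt, if_true]
      congr 1
      exact fuelIrrel _ _ _ _ (by simp only [List.length_drop]; omega) (by simp only [List.length_drop]; omega)

-- ===== VERDICT (by name: the statement is the Claim_ definition above) =====
theorem checkCount_spec : Claim_unchanged_checkCount := by
  intro progresses speeds _ hpre hd
  obtain ⟨hlen, hgood⟩ := hpre
  have hne : progresses.zip speeds ≠ [] := by
    cases progresses with
    | nil => exact absurd rfl hd
    | cons p ps =>
      cases speeds with
      | nil => simp at hlen
      | cons s ss => simp
  unfold checkCount checkCount_alt
  have h1 := foldA speeds progresses speeds 0 0 0 [] (by simp)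
    (by simpa [List.length_zip] using hlen)
  simp only [Nat.cast_zero] at h1
  rw [show (PySem.List.enumerate progresses : List (Int × Int))
      = PySem.List.enumerate progresses 0 from rfl]
  rw [h1]
  rw [L0 (progresses.zip speeds) 0 hgood hne]
  simp

theorem checkCount_changed : Claim_changed_checkCount := by
  unfold Claim_changed_checkCount; decide

theorem checkCount_tight : Claim_exact_checkCount := by
  intro progresses speeds _ _ hd
  subst hd
  simp [checkCount, checkCount_alt, PySem.List.enumerate, altLoopF]
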